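-- pv_equiv track=rewrite | github.com/Chord-West/Algorithm | PythonAlgorithm/Test/빗물저장소.py | solution
-- ===== SOURCE A (Python) =====
-- def solution(height):
--     answer = 0
--     stan = sorted(set(height), reverse=True)
--     for s in stan:
--         x = height.index(s)
--         for i, h in enumerate(height):
--             if h == s:
--                 answer += i - x + 1
--                 x = i
--
--     return answer
-- ===== SOURCE B (Python) =====
-- def solution(height):
--     first = {}
--     last = {}
--     for i, h in enumerate(height):
--         first.setdefault(h, i)
--         last[h] = i
--     return len(height) + sum(last[v] - first[v] for v in first)
-- ===== Notes on version B (the rewrite author's own statement) =====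
-- stated objective: faster
-- what changed: Replaces A's sort of the distinct values plus a full rescan of height (with list.index) per distinct value by one pass over height recording first and last index per value in two dicts, returning len(height) + sum(last-first).
import Mathlib
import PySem

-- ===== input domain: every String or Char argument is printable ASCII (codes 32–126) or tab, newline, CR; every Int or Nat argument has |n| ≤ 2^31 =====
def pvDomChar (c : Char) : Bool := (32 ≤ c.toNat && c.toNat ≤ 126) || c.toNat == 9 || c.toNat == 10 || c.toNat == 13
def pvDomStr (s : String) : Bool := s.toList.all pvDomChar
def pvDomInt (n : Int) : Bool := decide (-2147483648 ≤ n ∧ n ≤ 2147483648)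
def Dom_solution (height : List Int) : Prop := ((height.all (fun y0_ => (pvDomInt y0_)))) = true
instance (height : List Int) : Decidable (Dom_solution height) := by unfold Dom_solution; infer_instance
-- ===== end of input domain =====

-- B replaces A's sort-of-distinct-values + full rescan per value by one pass recording
-- first/last index per value in two dicts (faster: O(n) instead of O(n^2)).


-- ===== PORT A =====
-- answer = 0; for s in sorted(set(height), reverse=True):
--   x = height.index(s)   -- s ∈ height always, so index? is some; .getD 0 is never used
--   for i, h in enumerate(height): if h == s: answer += i - x + 1; x = i
def solution (height : List Int) : Int :=
  let stan := PySem.List.sorted (PySem.Set.ofList height) (fun x => x) true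
  (stan.foldl (fun answer s =>
    let x0 : Int := (((PySem.List.index? height s).getD 0 : Nat) : Int)
    ((PySem.List.enumerate height).foldl
      (fun (p : Int × Int) ih => if ih.2 = s then (p.1 + ih.1 - p.2 + 1, ih.1) else p)
      (answer, x0)).1) 0)

-- ===== PORT B =====
-- first = {}; last = {};
-- for i, h in enumerate(height): first.setdefault(h, i); last[h] = i
-- return len(height) + sum(last[v] - first[v] for v in first)
def solution_alt (height : List Int) : Int :=
  let p := (PySem.List.enumerate height).foldl
    (fun (fd : PySem.Dict Int Int × PySem.Dict Int Int) ih =>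
      (fd.1.setdefault ih.2 ih.1, fd.2.insert ih.2 ih.1))
    (PySem.Dict.empty, PySem.Dict.empty)
  (height.length : Int) + (p.1.keys.map (fun v => p.2.getD v 0 - p.1.getD v 0)).sum

-- ===== PRECONDITION & SPEC =====
def Spec_solution (height : List Int) (out : Int) : Prop := out = solution_alt height
instance (height : List Int) (out : Int) : Decidable (Spec_solution height out) := by unfold Spec_solution; infer_instance

-- ===== CLAIM (what is proved, stated in full; the proofs are below) =====
def Claim_equal_solution : Prop := ∀ (height : List Int), Dom_solution height → Spec_solution height (solution height)

-- ===== LEMMAS AND PROOFS =====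

-- the indices at which value v occurs in ps (ps an enumerate list)
def pvOcc (ps : List (Int × Int)) (v : Int) : List Int :=
  (ps.filter (fun ih => ih.2 = v)).map (·.1)

theorem pvOcc_nil (v : Int) : pvOcc [] v = [] := rfl

theorem pvOcc_cons (p : Int × Int) (ps : List (Int × Int)) (v : Int) :
    pvOcc (p :: ps) v = if p.2 = v then p.1 :: pvOcc ps v else pvOcc ps v := by
  simp [pvOcc, List.filter_cons]; split_ifs <;> simp_all

-- A's inner loop, characterised: adds |occ| + (last occ − x), and x becomes the last occ.
theorem innerA (s : Int) (ps : List (Int × Int)) (a x : Int) :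
    ps.foldl (fun (p : Int × Int) ih => if ih.2 = s then (p.1 + ih.1 - p.2 + 1, ih.1) else p) (a, x)
    = (a + ((pvOcc ps s).length : Int) + ((pvOcc ps s).getLast?.getD x - x),
       (pvOcc ps s).getLast?.getD x) := by
  induction ps generalizing a x with
  | nil => simp [pvOcc_nil]
  | cons p ps ih =>
    rw [List.foldl_cons, pvOcc_cons]
    by_cases h : p.2 = s
    · simp only [h, ih]
      cases hM : (pvOcc ps s).getLast? with
      | none => simp [List.getLast?_cons, hM]; ring
      | some L => simp [List.getLast?_cons, hM]; omega
    · simp only [ih, h, ite_false]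

-- B's one-pass fold, characterised: the dicts hold first/last occurrence index per value.
theorem pvBfold_fst_getD (ps : List (Int × Int)) (d1 d2 : PySem.Dict Int Int) (v d : Int) :
    ((ps.foldl (fun (fd : PySem.Dict Int Int × PySem.Dict Int Int) ih =>
        (fd.1.setdefault ih.2 ih.1, fd.2.insert ih.2 ih.1)) (d1, d2)).1).getD v d
    = d1.getD v ((pvOcc ps v).head?.getD d) := by
  induction ps generalizing d1 d2 with
  | nil => simp [pvOcc_nil]
  | cons p ps ih =>
    rw [List.foldl_cons, pvOcc_cons]
    by_cases h : p.2 = v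
    · rw [if_pos h, ih]
      simp only [List.head?_cons, Option.getD_some, ← h, PySem.Dict.getD_setdefault_self]
    · rw [if_neg h, ih]
      have hne : v ≠ p.2 := fun hv => h hv.symm
      simp [PySem.Dict.getD, PySem.Dict.get?_setdefault_of_ne d1 p.1 hne]

theorem pvBfold_snd_getD (ps : List (Int × Int)) (d1 d2 : PySem.Dict Int Int) (v d : Int) :
    ((ps.foldl (fun (fd : PySem.Dict Int Int × PySem.Dict Int Int) ih =>
        (fd.1.setdefault ih.2 ih.1, fd.2.insert ih.2 ih.1)) (d1, d2)).2).getD v d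
    = (pvOcc ps v).getLast?.getD (d2.getD v d) := by
  induction ps generalizing d1 d2 with
  | nil => simp [pvOcc_nil]
  | cons p ps ih =>
    rw [List.foldl_cons, pvOcc_cons]
    by_cases h : p.2 = v
    · rw [if_pos h, ih, PySem.Dict.getD_insert]
      rw [if_pos h.symm]
      cases hM : (pvOcc ps v).getLast? with
      | none => simp [List.getLast?_cons, hM]
      | some L => simp [List.getLast?_cons, hM]
    · rw [if_neg h, ih, PySem.Dict.getD_insert, if_neg (fun hv => h hv.symm)]

theorem pvBfold_fst_keys (ps : List (Int × Int)) (d1 d2 : PySem.Dict Int Int) :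
    ((ps.foldl (fun (fd : PySem.Dict Int Int × PySem.Dict Int Int) ih =>
        (fd.1.setdefault ih.2 ih.1, fd.2.insert ih.2 ih.1)) (d1, d2)).1).keys
    = PySem.Set.update d1.keys (ps.map (·.2)) := by
  induction ps generalizing d1 d2 with
  | nil => simp [PySem.Set.update]
  | cons p ps ih =>
    rw [List.foldl_cons, List.map_cons, ih]
    have hk : (d1.setdefault p.2 p.1).keys = PySem.Set.add d1.keys p.2 := by
      rw [PySem.Dict.keys_setdefault]
      have hc : (d1.contains p.2) = (PySem.Set.contains d1.keys p.2) := by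
        simp only [PySem.Dict.contains, PySem.Set.contains, PySem.Dict.keys]
        rw [Bool.eq_iff_iff]
        simp [List.any_eq_true, List.mem_map]
      simp only [PySem.Set.add, PySem.Set.contains, hc]
      rfl
    rw [hk]
    rfl

-- first occurrence index: head of pvOcc over enumerate = height.index
theorem pvOcc_head_index (xs : List Int) (v : Int) (s : Int) :
    (pvOcc (PySem.List.enumerate xs s) v).head?
    = (PySem.List.index? xs v).map (fun k => s + (k : Int)) := by
  induction xs generalizing s with
  | nil => simp [PySem.List.enumerate, pvOcc_nil, PySem.List.index?]
  | cons x xs ih =>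
    rw [PySem.List.enumerate_cons, pvOcc_cons]
    by_cases h : x = v
    · subst h; rw [PySem.List.index?_cons_self]; simp
    · rw [if_neg h, PySem.List.index?_cons_of_ne xs h, ih]
      cases PySem.List.index? xs v with
      | none => simp
      | some k => simp; omega

theorem pvOcc_length_count (xs : List Int) (v : Int) (s : Int) :
    (pvOcc (PySem.List.enumerate xs s) v).length = xs.count v := by
  induction xs generalizing s with
  | nil => simp [PySem.List.enumerate, pvOcc_nil]
  | cons x xs ih =>
    rw [PySem.List.enumerate_cons, pvOcc_cons, List.count_cons]
    by_cases h : x = v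
    · rw [if_pos h, List.length_cons, ih]; simp [h]
    · rw [if_neg h, ih]; simp [h]

-- A's per-value contribution
def pvFirst (height : List Int) (s : Int) : Int := (((PySem.List.index? height s).getD 0 : Nat) : Int)

def pvG (height : List Int) (s : Int) : Int :=
  ((pvOcc (PySem.List.enumerate height) s).length : Int) +
  ((pvOcc (PySem.List.enumerate height) s).getLast?.getD (pvFirst height s) - pvFirst height s)

theorem pvA_eq (height : List Int) :
    solution height
    = ((PySem.List.sorted (PySem.Set.ofList height) (fun x => x) true).map (pvG height)).sum := by
  unfold solution
  simp only [innerA]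
  have hb : (fun (answer s : Int) =>
      answer + ((pvOcc (PySem.List.enumerate height) s).length : Int) +
        ((pvOcc (PySem.List.enumerate height) s).getLast?.getD
          (((PySem.List.index? height s).getD 0 : Nat) : Int) -
          (((PySem.List.index? height s).getD 0 : Nat) : Int)))
      = fun (answer s : Int) => answer + pvG height s := by
    funext a s; unfold pvG pvFirst; ring
  rw [hb, PySem.List.foldl_add]
  simp

theorem pvB_eq (height : List Int) :
    solution_alt height
    = (height.length : Int) + ((PySem.Set.ofList height).map
        (fun v => (pvOcc (PySem.List.enumerate height) v).getLast?.getD 0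
                 - (pvOcc (PySem.List.enumerate height) v).head?.getD 0)).sum := by
  simp only [solution_alt, pvBfold_fst_keys, pvBfold_fst_getD, pvBfold_snd_getD,
    PySem.Dict.getD_empty, PySem.Dict.keys_empty, PySem.Set.update_nil_left,
    PySem.List.map_snd_enumerate]

theorem pv_sum_count (xs : List Int) :
    ((PySem.Set.ofList xs).map (fun v => (xs.count v : Int))).sum = (xs.length : Int) := by
  have hperm : (PySem.Set.ofList xs).Perm xs.dedup :=
    (List.perm_ext_iff_of_nodup (PySem.Set.nodup_ofList xs) (List.nodup_dedup xs)).2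
      (by intro a; simp [PySem.Set.mem_ofList, List.mem_dedup])
  have h2 : ((PySem.Set.ofList xs).map (fun v => xs.count v)).sum
      = ((xs.dedup.map (fun v => xs.count v)).sum) := (hperm.map _).sum_eq
  have h3 := List.sum_map_count_dedup_eq_length xs
  have h4 : ((PySem.Set.ofList xs).map (fun v => xs.count v)).sum = xs.length := by
    rw [h2]; exact h3
  calc ((PySem.Set.ofList xs).map (fun v => (xs.count v : Int))).sum
      = (((PySem.Set.ofList xs).map (fun v => xs.count v)).sum : Int) := by
        induction PySem.Set.ofList xs with
        | nil => simp
        | cons y ys ih => simp [ih]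
    _ = (xs.length : Int) := by rw [h4]

-- ===== VERDICT (by name: the statement is the Claim_ definition above) =====
theorem solution_spec : Claim_equal_solution := by
  intro height _
  unfold Spec_solution
  rw [pvA_eq, pvB_eq]
  have hperm := PySem.List.sorted_perm (PySem.Set.ofList height) (fun x => x) true
  rw [(hperm.map (pvG height)).sum_eq]
  have hcong : (PySem.Set.ofList height).map (pvG height)
      = (PySem.Set.ofList height).map (fun v => (height.count v : Int) +
          ((pvOcc (PySem.List.enumerate height) v).getLast?.getD 0
           - (pvOcc (PySem.List.enumerate height) v).head?.getD 0)) := by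
    apply List.map_congr_left
    intro v hv
    have hvmem : v ∈ height := (PySem.Set.mem_ofList height v).1 hv
    obtain ⟨k, hk⟩ : ∃ k, PySem.List.index? height v = some k := by
      cases hidx : PySem.List.index? height v with
      | none => exact absurd ((PySem.List.index?_eq_none_iff height v).1 hidx) (by simp [hvmem])
      | some k => exact ⟨k, rfl⟩
    have hhead : (pvOcc (PySem.List.enumerate height) v).head? = some ((k : Int)) := by
      rw [pvOcc_head_index height v 0, hk]; simp
    have hfirst : pvFirst height v = (k : Int) := by unfold pvFirst; rw [hk]; rfl
    obtain ⟨L, hL⟩ : ∃ L, (pvOcc (PySem.List.enumerate height) v).getLast? = some L := by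
      cases hocc : pvOcc (PySem.List.enumerate height) v with
      | nil => rw [hocc] at hhead; simp at hhead
      | cons a t => exact ⟨(a :: t).getLast (by simp), List.getLast?_eq_some_getLast (by simp)⟩
    unfold pvG
    rw [hfirst, hL, hhead, pvOcc_length_count]
    simp
  rw [hcong, PySem.List.sum_map_add_int, pv_sum_count]
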